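-- pv_equiv track=rewrite | github.com/Thaldevkaim/MoodMagic | moodmagic/backend/ai_generator.py | _parse_copy
-- ===== SOURCE A (Python) =====
-- def _parse_copy(response: str) -> tuple:
--     """
--     Parse headline and tagline from the AI response
--     """
--     headline = "Where Design Meets Inspiration"
--     tagline = "Design that speaks to the soul"
--
--     lines = response.split('\n')
--     for line in lines:
--         if line.startswith('Headline:'):
--             headline = line.replace('Headline:', '').strip()
--         elif line.startswith('Tagline:'):
--             tagline = line.replace('Tagline:', '').strip()
--
--     return headline, tagline
-- ===== SOURCE B (Python) =====
-- def _parse_copy(response: str) -> tuple: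
--     """Parse headline and tagline: scan lines back-to-front, first match from
--     the end wins (equals last-match-wins), stop as soon as both are found."""
--     headline = None
--     tagline = None
--     for line in reversed(response.split('\n')):
--         if headline is None and line.startswith('Headline:'):
--             headline = line.replace('Headline:', '').strip()
--         if tagline is None and line.startswith('Tagline:'):
--             tagline = line.replace('Tagline:', '').strip()
--         if headline is not None and tagline is not None:
--             break
--     return (headline if headline is not None else "Where Design Meets Inspiration",
--             tagline if tagline is not None else "Design that speaks to the soul")
-- ===== Notes on version B (the rewrite author's own statement) =====
-- stated objective: alternative
-- what changed: Replaces the forward fold that overwrites state on every matching line with a backward scan that takes the first match from the end for each field and breaks early once both are found.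
import Mathlib
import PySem

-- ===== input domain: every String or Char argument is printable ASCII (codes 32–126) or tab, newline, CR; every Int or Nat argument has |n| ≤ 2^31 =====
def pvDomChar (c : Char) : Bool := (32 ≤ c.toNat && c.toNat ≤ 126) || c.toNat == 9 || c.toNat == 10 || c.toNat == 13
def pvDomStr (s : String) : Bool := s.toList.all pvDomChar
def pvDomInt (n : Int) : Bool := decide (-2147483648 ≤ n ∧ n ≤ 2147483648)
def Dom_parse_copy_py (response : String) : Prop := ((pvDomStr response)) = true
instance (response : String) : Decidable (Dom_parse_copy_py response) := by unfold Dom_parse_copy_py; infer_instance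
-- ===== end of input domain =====

-- B replaces A's forward overwrite-on-every-match fold by a backward scan taking
-- the first match from the end for each field, with early exit (objective: alternative).

-- line.replace(prefix, '').strip()  (shared by both ports; lines are List Char)
def pvExtract (pre line : List Char) : String :=
  String.ofList (PySem.Chars.strip (PySem.Chars.replace line pre []))

-- ===== PORT A =====
def parse_copy_py (response : String) : String × String :=
  let lines := PySem.Chars.splitOn response.toList ['\n']
  lines.foldl
    (fun (st : String × String) line =>
      if PySem.Chars.startswith line ['H','e','a','d','l','i','n','e',':'] then
        (pvExtract ['H','e','a','d','l','i','n','e',':'] line, st.2)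
      else if PySem.Chars.startswith line ['T','a','g','l','i','n','e',':'] then
        (st.1, pvExtract ['T','a','g','l','i','n','e',':'] line)
      else st)
    ("Where Design Meets Inspiration", "Design that speaks to the soul")

-- ===== PORT B =====
-- the reversed-lines loop with early break once both fields are found
def parse_copy_py_altGo : List (List Char) → Option String → Option String → String × String
  | [], oh, ot =>
      (oh.getD "Where Design Meets Inspiration", ot.getD "Design that speaks to the soul")
  | l :: ls, oh, ot =>
      let oh' := if oh.isNone && PySem.Chars.startswith l ['H','e','a','d','l','i','n','e',':'] then
          some (pvExtract ['H','e','a','d','l','i','n','e',':'] l) else oh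
      let ot' := if ot.isNone && PySem.Chars.startswith l ['T','a','g','l','i','n','e',':'] then
          some (pvExtract ['T','a','g','l','i','n','e',':'] l) else ot
      match oh', ot' with
      | some h, some t => (h, t)   -- break
      | oh', ot' => parse_copy_py_altGo ls oh' ot'

def parse_copy_py_alt (response : String) : String × String :=
  parse_copy_py_altGo (PySem.Chars.splitOn response.toList ['\n']).reverse none none

-- ===== PRECONDITION & SPEC =====
def Spec_parse_copy_py (response : String) (out : String × String) : Prop := out = parse_copy_py_alt response
instance (response : String) (out : String × String) : Decidable (Spec_parse_copy_py response out) := by unfold Spec_parse_copy_py; infer_instance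

-- ===== CLAIM (what is proved, stated in full; the proofs are below) =====
def Claim_equal_parse_copy_py : Prop := ∀ (response : String), Dom_parse_copy_py response → Spec_parse_copy_py response (parse_copy_py response)

-- ===== LEMMAS AND PROOFS =====

-- a line cannot start with both literals ('H' ≠ 'T')
lemma pv_excl (l : List Char) (h : PySem.Chars.startswith l ['H','e','a','d','l','i','n','e',':'] = true) :
    PySem.Chars.startswith l ['T','a','g','l','i','n','e',':'] = false := by
  rw [PySem.Chars.startswith_iff] at h
  by_contra hb
  rw [Bool.not_eq_false, PySem.Chars.startswith_iff] at hb
  obtain ⟨s, hs⟩ := h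
  obtain ⟨t, ht⟩ := hb
  rw [← hs] at ht
  simp at ht

-- characterization of A's fold: each component is set by the LAST matching line
lemma pv_foldA (ls : List (List Char)) (h t : String) :
    ls.foldl
      (fun (st : String × String) line =>
        if PySem.Chars.startswith line ['H','e','a','d','l','i','n','e',':'] then
          (pvExtract ['H','e','a','d','l','i','n','e',':'] line, st.2)
        else if PySem.Chars.startswith line ['T','a','g','l','i','n','e',':'] then
          (st.1, pvExtract ['T','a','g','l','i','n','e',':'] line)
        else st) (h, t)
    = (((ls.reverse.find? (fun l => PySem.Chars.startswith l ['H','e','a','d','l','i','n','e',':'])).map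
          (pvExtract ['H','e','a','d','l','i','n','e',':'])).getD h,
       ((ls.reverse.find? (fun l => PySem.Chars.startswith l ['T','a','g','l','i','n','e',':'])).map
          (pvExtract ['T','a','g','l','i','n','e',':'])).getD t) := by
  induction ls generalizing h t with
  | nil => simp
  | cons a ls ih =>
      simp only [List.foldl_cons, List.reverse_cons, List.find?_append]
      by_cases hH : PySem.Chars.startswith a ['H','e','a','d','l','i','n','e',':'] = true
      · have hT := pv_excl a hH
        rw [ih]
        cases hfH : ls.reverse.find? (fun l => PySem.Chars.startswith l ['H','e','a','d','l','i','n','e',':']) <;>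
          cases hfT : ls.reverse.find? (fun l => PySem.Chars.startswith l ['T','a','g','l','i','n','e',':']) <;>
          simp [hH, hT]
      · by_cases hT : PySem.Chars.startswith a ['T','a','g','l','i','n','e',':'] = true
        · rw [if_neg hH, if_pos hT, ih]
          cases hfH : ls.reverse.find? (fun l => PySem.Chars.startswith l ['H','e','a','d','l','i','n','e',':']) <;>
            cases hfT : ls.reverse.find? (fun l => PySem.Chars.startswith l ['T','a','g','l','i','n','e',':']) <;>
            simp [hH, hT]
        · rw [if_neg hH, if_neg hT, ih]
          cases hfH : ls.reverse.find? (fun l => PySem.Chars.startswith l ['H','e','a','d','l','i','n','e',':']) <;>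
            cases hfT : ls.reverse.find? (fun l => PySem.Chars.startswith l ['T','a','g','l','i','n','e',':']) <;>
            simp [hH, hT]

-- characterization of B's loop: each component is the FIRST match in the (reversed) list
lemma pv_goB (r : List (List Char)) (oh ot : Option String) :
    parse_copy_py_altGo r oh ot
    = (oh.getD (((r.find? (fun l => PySem.Chars.startswith l ['H','e','a','d','l','i','n','e',':'])).map
          (pvExtract ['H','e','a','d','l','i','n','e',':'])).getD "Where Design Meets Inspiration"),
       ot.getD (((r.find? (fun l => PySem.Chars.startswith l ['T','a','g','l','i','n','e',':'])).map
          (pvExtract ['T','a','g','l','i','n','e',':'])).getD "Design that speaks to the soul")) := by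
  induction r generalizing oh ot with
  | nil => simp [parse_copy_py_altGo]
  | cons a ls ih =>
      simp only [parse_copy_py_altGo]
      cases oh <;> cases ot <;>
        by_cases hH : PySem.Chars.startswith a ['H','e','a','d','l','i','n','e',':'] = true <;>
        by_cases hT : PySem.Chars.startswith a ['T','a','g','l','i','n','e',':'] = true <;>
        simp [hH, hT, ih]

-- ===== VERDICT (by name: the statement is the Claim_ definition above) =====
theorem parse_copy_py_spec : Claim_equal_parse_copy_py := by
  intro response _
  show parse_copy_py response = parse_copy_py_alt response
  unfold parse_copy_py parse_copy_py_alt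
  rw [pv_goB, pv_foldA]
  simp
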